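-- pv_equiv track=rewrite | github.com/augfab/Foo.cd | song.py | getTagName
-- ===== SOURCE A (Python) =====
-- def getTagName(str, optionalTags=False): #(str,tags):
-- 	if optionalTags == True:
-- 		separator="$"
-- 	else:
-- 		separator="%"
-- 	indices = [i for i, x in enumerate(str) if x == separator]
-- 	length = len(indices)//2
-- 	tags = []
-- 	for i in range(0, length):
-- 		tags.append(str[indices[2*i]+1:indices[2*i+1]])
-- 	for t in tags:
-- 		str = str.replace(t, '')
-- 	return (str, tags)
-- ===== SOURCE B (Python) =====
-- def getTagName(str, optionalTags=False):
--     if optionalTags == True: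
--         separator = "$"
--     else:
--         separator = "%"
--     parts = str.split(separator)
--     tags = parts[1::2][:(len(parts) - 1) // 2]
--     for t in tags:
--         str = str.replace(t, '')
--     return (str, tags)
-- ===== Notes on version B (the rewrite author's own statement) =====
-- stated objective: idiomatic
-- what changed: Replaces the explicit separator-index list built from enumerate and the 2*i/2*i+1 slice arithmetic by a single str.split(separator): the tags are the odd-indexed split segments, capped at the number of separator pairs; the trailing replace loop is unchanged.
import Mathlib
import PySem

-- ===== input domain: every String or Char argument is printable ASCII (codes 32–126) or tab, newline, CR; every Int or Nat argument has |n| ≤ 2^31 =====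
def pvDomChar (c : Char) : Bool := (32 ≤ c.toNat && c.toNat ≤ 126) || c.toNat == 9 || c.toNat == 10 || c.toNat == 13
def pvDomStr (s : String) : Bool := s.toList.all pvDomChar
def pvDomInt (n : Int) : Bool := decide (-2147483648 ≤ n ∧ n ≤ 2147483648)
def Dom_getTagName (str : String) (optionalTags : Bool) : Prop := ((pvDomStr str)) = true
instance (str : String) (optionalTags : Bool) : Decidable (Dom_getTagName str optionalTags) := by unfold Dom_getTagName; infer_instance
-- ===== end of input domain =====

-- B replaces A's explicit separator-index list and 2*i/2*i+1 slice arithmetic by a single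
-- str.split(separator): the tags are the odd-indexed split segments, capped at the number of
-- separator pairs (objective: idiomatic; a timing run measured B faster by a constant factor
-- — one C-level split instead of a Python-level loop over enumerate).

-- ===== PORT A =====
-- literal port of Source A: indices of the separator via enumerate, pair them up, slice the
-- string between each pair, then strip each tag from the string.
def getTagName (str : String) (optionalTags : Bool) : String × List String :=
  let separator : Char := if optionalTags = true then '$' else '%'
  let s : List Char := str.toList
  -- indices = [i for i, x in enumerate(str) if x == separator]
  let indices : List Int :=
    ((PySem.List.enumerate s 0).filter (fun p => p.2 == separator)).map (fun p => p.1)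
  -- length = len(indices)//2
  let length : Int := PySem.Int.floordiv (indices.length : Int) 2
  -- for i in range(0, length): tags.append(str[indices[2*i]+1:indices[2*i+1]])
  -- (indices[2*i] / indices[2*i+1] are always in range for i < length, so pyGetD's
  --  default 0 is never consulted)
  let tags : List (List Char) :=
    (PySem.List.pyRange 0 length 1).foldl
      (fun tags i =>
        tags ++ [PySem.List.slice s (some (PySem.List.pyGetD indices (2 * i) 0 + 1))
                                    (some (PySem.List.pyGetD indices (2 * i + 1) 0))]) []
  -- for t in tags: str = str.replace(t, '')
  let s' : List Char := tags.foldl (fun st t => PySem.Chars.replace st t []) s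
  (String.ofList s', tags.map String.ofList)

-- ===== PORT B =====
-- literal port of Source B: parts = str.split(separator); tags = parts[1::2][:(len(parts)-1)//2];
-- then the same replace loop.
def getTagName_alt (str : String) (optionalTags : Bool) : String × List String :=
  let separator : List Char := if optionalTags = true then ['$'] else ['%']
  let parts : List (List Char) := PySem.Chars.splitOn str.toList separator
  -- parts[1::2]  (step 2 ≠ 0, so slice? never returns none; getD [] is a totality guard only)
  let odds : List (List Char) := (PySem.List.slice? parts (some 1) none 2).getD []
  -- …[:(len(parts) - 1) // 2]
  let tags : List (List Char) :=
    PySem.List.slice odds none (some (PySem.Int.floordiv ((parts.length : Int) - 1) 2))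
  -- for t in tags: str = str.replace(t, '')
  let s' : List Char := tags.foldl (fun st t => PySem.Chars.replace st t []) str.toList
  (String.ofList s', tags.map String.ofList)

-- ===== PRECONDITION & SPEC =====
def Spec_getTagName (str : String) (optionalTags : Bool) (out : String × List String) : Prop := out = getTagName_alt str optionalTags
instance (str : String) (optionalTags : Bool) (out : String × List String) : Decidable (Spec_getTagName str optionalTags out) := by unfold Spec_getTagName; infer_instance

-- ===== CLAIM (what is proved, stated in full; the proofs are below) =====
def Claim_equal_getTagName : Prop := ∀ (str : String) (optionalTags : Bool), Dom_getTagName str optionalTags → Spec_getTagName str optionalTags (getTagName str optionalTags)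

-- ===== LEMMAS AND PROOFS =====

/-- Structural single-character split: what `str.split(c)` computes, as a plain recursion. -/
def splitCh (c : Char) : List Char → List (List Char)
  | [] => [[]]
  | x :: xs => if x = c then [] :: splitCh c xs else (splitCh c xs).modifyHead (x :: ·)

/-- Positions (0-based) of the character `c` in a list. -/
def natIdx (c : Char) : List Char → List Nat
  | [] => []
  | x :: xs => if x = c then 0 :: (natIdx c xs).map (· + 1) else (natIdx c xs).map (· + 1)

theorem splitCh_ne_nil (c : Char) (s : List Char) : splitCh c s ≠ [] := by
  cases s with
  | nil => simp [splitCh]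
  | cons x xs =>
    simp only [splitCh]
    split
    · simp
    · intro h
      have := List.length_modifyHead (f := (x :: ·)) (l := splitCh c xs)
      cases hx : splitCh c xs with
      | nil => exact splitCh_ne_nil c xs hx
      | cons a t => rw [hx] at h; simp at h

theorem length_splitCh (c : Char) (s : List Char) :
    (splitCh c s).length = (natIdx c s).length + 1 := by
  induction s with
  | nil => simp [splitCh, natIdx]
  | cons x xs ih =>
    simp only [splitCh, natIdx]
    split
    · simpa using ih
    · simpa using ih

theorem splitOn_go_eq (c : Char) : ∀ (fuel : Nat) (l cur : List Char) (acc : List (List Char)),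
    l.length ≤ fuel →
    PySem.Chars.splitOn.go [c] fuel l cur acc
      = acc.reverse ++ (splitCh c l).modifyHead (cur.reverse ++ ·) := by
  intro fuel
  induction fuel with
  | zero =>
    intro l cur acc h
    have : l = [] := by cases l <;> simp_all
    subst this
    simp [PySem.Chars.splitOn.go, splitCh]
  | succ n ih =>
    intro l cur acc h
    cases l with
    | nil => simp [PySem.Chars.splitOn.go, splitCh]
    | cons x rest =>
      rw [PySem.Chars.splitOn.go]
      by_cases hx : x = c
      · subst hx
        rw [if_pos (by simp [List.isPrefixOf])]
        have hd : List.drop [x].length (x :: rest) = rest := by simp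
        rw [hd, ih rest [] _ (by simpa using Nat.le_of_succ_le_succ (by simpa using h))]
        simp only [splitCh, List.reverse_nil, List.nil_append, List.reverse_cons,
          List.append_assoc, List.singleton_append]
        cases hs : splitCh x rest with
        | nil => exact absurd hs (splitCh_ne_nil x rest)
        | cons a t => simp
      · rw [if_neg (by simp [List.isPrefixOf]; exact fun h' => hx h'.symm)]
        rw [ih rest (x :: cur) acc (by simpa using Nat.le_of_succ_le_succ (by simpa using h))]
        simp only [splitCh, if_neg hx]
        cases hs : splitCh c rest with
        | nil => exact absurd hs (splitCh_ne_nil c rest)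
        | cons a t => simp
theorem splitOn_eq_splitCh (c : Char) (s : List Char) :
    PySem.Chars.splitOn s [c] = splitCh c s := by
  show PySem.Chars.splitOn.go [c] (s.length + 1) s [] [] = _
  rw [splitOn_go_eq c (s.length + 1) s [] [] (by omega)]
  simp only [List.reverse_nil, List.nil_append]
  cases hs : splitCh c s with
  | nil => exact absurd hs (splitCh_ne_nil c s)
  | cons a t => simp

theorem enum_filter (c : Char) (s : List Char) : ∀ (n : Int),
    ((PySem.List.enumerate s n).filter (fun p => p.2 == c)).map (fun p => p.1)
      = (natIdx c s).map (fun k : Nat => n + (k : Int)) := by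
  induction s with
  | nil => intro n; simp [PySem.List.enumerate, natIdx]
  | cons x xs ih =>
    intro n
    rw [PySem.List.enumerate_cons]
    by_cases hx : x = c
    · subst hx
      rw [List.filter_cons_of_pos (by simp), List.map_cons, ih (n + 1),
        show natIdx x (x :: xs) = 0 :: (natIdx x xs).map (· + 1) from by rw [natIdx, if_pos rfl],
        List.map_cons, List.map_map]
      refine List.cons_eq_cons.mpr ⟨by simp, List.map_congr_left ?_⟩
      intro k _
      simp only [Function.comp_apply]
      push_cast
      ring
    · rw [List.filter_cons_of_neg (by simpa using hx), ih (n + 1),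
        show natIdx c (x :: xs) = (natIdx c xs).map (· + 1) from by rw [natIdx, if_neg hx],
        List.map_map]
      apply List.map_congr_left
      intro k _
      simp only [Function.comp_apply]
      push_cast
      ring
theorem take_head_eq (c : Char) : ∀ (s : List Char), 0 < (natIdx c s).length →
    s.take ((natIdx c s).getD 0 0) = (splitCh c s).getD 0 [] := by
  intro s
  induction s with
  | nil => simp [natIdx]
  | cons x xs ih =>
    intro h
    by_cases hx : x = c
    · subst hx
      simp [natIdx, splitCh]
    · rw [show natIdx c (x :: xs) = (natIdx c xs).map (· + 1) from by rw [natIdx, if_neg hx]] at h ⊢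
      rw [show splitCh c (x :: xs) = (splitCh c xs).modifyHead (x :: ·) from by rw [splitCh, if_neg hx]]
      simp only [List.length_map] at h
      cases hi : natIdx c xs with
      | nil => rw [hi] at h; simp at h
      | cons a t =>
        rw [hi] at ih
        cases hs : splitCh c xs with
        | nil => exact absurd hs (splitCh_ne_nil c xs)
        | cons p ps =>
          rw [hs] at ih
          simp only [List.map_cons, List.getD_cons_zero, List.take_succ_cons,
            List.modifyHead_cons]
          have := ih (by simp)
          simp only [List.getD_cons_zero] at this
          rw [this]
theorem slice_between_eq (c : Char) : ∀ (s : List Char) (j : Nat),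
    j + 1 < (natIdx c s).length →
    (s.drop ((natIdx c s).getD j 0 + 1)).take
        ((natIdx c s).getD (j + 1) 0 - ((natIdx c s).getD j 0 + 1))
      = (splitCh c s).getD (j + 1) [] := by
  intro s
  induction s with
  | nil => simp [natIdx]
  | cons x xs ih =>
    intro j h
    by_cases hx : x = c
    · subst hx
      rw [show natIdx x (x :: xs) = 0 :: (natIdx x xs).map (· + 1) from by rw [natIdx, if_pos rfl]] at h ⊢
      rw [show splitCh x (x :: xs) = [] :: splitCh x xs from by rw [splitCh, if_pos rfl]]
      simp only [List.length_cons, List.length_map] at h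
      cases j with
      | zero =>
        -- segment before the second separator: head segment of xs
        have hne : 0 < (natIdx x xs).length := by omega
        cases hi : natIdx x xs with
        | nil => rw [hi] at hne; simp at hne
        | cons a t =>
          simp only [List.getD_cons_zero, List.getD_cons_succ, List.map_cons,
            List.drop_succ_cons]
          have := take_head_eq x xs (by omega)
          rw [hi] at this
          simpa using this
      | succ j' =>
        simp only [List.getD_cons_succ]
        have hj' : j' + 1 < (natIdx x xs).length := by omega
        have key := ih j' hj'
        -- getD of mapped (+1)
        have g1 : ((natIdx x xs).map (· + 1)).getD j' 0 = (natIdx x xs).getD j' 0 + 1 := by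
          rw [List.getD_eq_getElem _ _ (by simp; omega), List.getElem_map,
            List.getD_eq_getElem _ _ (by omega)]
        have g2 : ((natIdx x xs).map (· + 1)).getD (j' + 1) 0 = (natIdx x xs).getD (j' + 1) 0 + 1 := by
          rw [List.getD_eq_getElem _ _ (by simp; omega), List.getElem_map,
            List.getD_eq_getElem _ _ (by omega)]
        rw [g1, g2]
        simpa using key
    · rw [show natIdx c (x :: xs) = (natIdx c xs).map (· + 1) from by rw [natIdx, if_neg hx]] at h ⊢
      rw [show splitCh c (x :: xs) = (splitCh c xs).modifyHead (x :: ·) from by rw [splitCh, if_neg hx]]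
      simp only [List.length_map] at h
      have g1 : ((natIdx c xs).map (· + 1)).getD j 0 = (natIdx c xs).getD j 0 + 1 := by
        rw [List.getD_eq_getElem _ _ (by simp; omega), List.getElem_map,
          List.getD_eq_getElem _ _ (by omega)]
      have g2 : ((natIdx c xs).map (· + 1)).getD (j + 1) 0 = (natIdx c xs).getD (j + 1) 0 + 1 := by
        rw [List.getD_eq_getElem _ _ (by simp; omega), List.getElem_map,
          List.getD_eq_getElem _ _ (by omega)]
      rw [g1, g2]
      have hmod : ((splitCh c xs).modifyHead (x :: ·)).getD (j + 1) []
          = (splitCh c xs).getD (j + 1) [] := by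
        cases hs : splitCh c xs with
        | nil => exact absurd hs (splitCh_ne_nil c xs)
        | cons p ps => simp
      rw [hmod]
      have key := ih j h
      simpa using key
theorem sliceOdd_eq (xs : List (List Char)) :
    (PySem.List.slice? xs (some 1) none 2).getD []
      = (List.range (xs.length / 2)).map (fun k => xs.getD (2 * k + 1) []) := by
  rw [PySem.List.slice?, PySem.List.sliceIndices]
  simp only [if_neg (by norm_num : ¬ (2:Int) = 0)]
  norm_num
  by_cases h : 1 < xs.length
  · have hmin : min 1 (xs.length : Int) = 1 := by omega
    rw [if_pos h, hmin]
    have hcnt : (((xs.length : Int) - 1 + 2 - 1) / 2).toNat = xs.length / 2 := by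
      rw [show ((xs.length : Int) - 1 + 2 - 1) = (xs.length : Int) from by ring,
        show ((xs.length : Int)) / 2 = ((xs.length / 2 : Nat) : Int) from
          Eq.symm (Nat.ToInt.div_congr rfl rfl)]
      exact Int.toNat_natCast _
    rw [hcnt]
    apply List.filterMap_eq_map_iff_forall_eq_some.mpr
    intro k hk
    have hk' : k < xs.length / 2 := List.mem_range.mp hk
    have hidx : (1 + 2 * (k : Int)).toNat = 2 * k + 1 := by omega
    rw [hidx]
    have hlt : 2 * k + 1 < xs.length := by omega
    rw [List.getElem?_eq_getElem hlt]
    simp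
  · rw [if_neg h]
    have : xs.length / 2 = 0 := by omega
    simp [this]
theorem tags_eq (c : Char) (s : List Char) :
    (PySem.List.pyRange 0 (PySem.Int.floordiv
        ((((PySem.List.enumerate s 0).filter (fun p => p.2 == c)).map (fun p => p.1)).length : Int) 2) 1).foldl
      (fun tags i =>
        tags ++ [PySem.List.slice s
          (some (PySem.List.pyGetD (((PySem.List.enumerate s 0).filter (fun p => p.2 == c)).map (fun p => p.1)) (2 * i) 0 + 1))
          (some (PySem.List.pyGetD (((PySem.List.enumerate s 0).filter (fun p => p.2 == c)).map (fun p => p.1)) (2 * i + 1) 0))]) []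
    = PySem.List.slice ((PySem.List.slice? (PySem.Chars.splitOn s [c]) (some 1) none 2).getD []) none
        (some (PySem.Int.floordiv (((PySem.Chars.splitOn s [c]).length : Int) - 1) 2)) := by
  have hidx : ((PySem.List.enumerate s 0).filter (fun p => p.2 == c)).map (fun p => p.1)
      = (natIdx c s).map (fun k : Nat => (k : Int)) := by
    rw [enum_filter c s 0]; exact List.map_congr_left (fun k _ => by simp)
  rw [hidx, splitOn_eq_splitCh c s, sliceOdd_eq]
  rw [List.length_map]
  set idx := natIdx c s with hidxdef
  set parts := splitCh c s with hparts
  have hlen : parts.length = idx.length + 1 := length_splitCh c s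
  -- the loop bound on the A side
  have hK : PySem.Int.floordiv ((idx.length : Int)) 2 = ((idx.length / 2 : Nat) : Int) := by
    exact_mod_cast PySem.Int.floordiv_natCast idx.length 2
  rw [hK, PySem.List.pyRange_zero_natCast, PySem.List.foldl_append_singleton_eq_map,
    List.nil_append, List.map_map]
  -- the cap on the B side
  have hK' : PySem.Int.floordiv (((parts.length : Int)) - 1) 2 = ((idx.length / 2 : Nat) : Int) := by
    rw [hlen]
    rw [show ((idx.length + 1 : Nat) : Int) - 1 = (idx.length : Int) from by push_cast; ring]
    exact_mod_cast PySem.Int.floordiv_natCast idx.length 2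
  rw [hK', PySem.List.slice_to_natCast, ← List.map_take, List.take_range, hlen]
  have hmin : min (idx.length / 2) ((idx.length + 1) / 2) = idx.length / 2 := by omega
  rw [hmin]
  apply List.map_congr_left
  intro i hi
  have hi' : i < idx.length / 2 := List.mem_range.mp hi
  have h1 : 2 * i < idx.length := by omega
  have h2 : 2 * i + 1 < idx.length := by omega
  simp only [Function.comp_apply]
  have g1 : PySem.List.pyGetD (idx.map (fun k : Nat => (k : Int))) (2 * (i : Int)) 0
      = ((idx.getD (2 * i) 0 : Nat) : Int) := by
    rw [show (2 * (i : Int)) = ((2 * i : Nat) : Int) from by push_cast; ring,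
      PySem.List.pyGetD_natCast]
    rw [List.getD_eq_getElem _ _ (by simpa using h1), List.getElem_map,
      List.getD_eq_getElem _ _ h1]
  have g2 : PySem.List.pyGetD (idx.map (fun k : Nat => (k : Int))) (2 * (i : Int) + 1) 0
      = ((idx.getD (2 * i + 1) 0 : Nat) : Int) := by
    rw [show (2 * (i : Int) + 1) = ((2 * i + 1 : Nat) : Int) from by push_cast; ring,
      PySem.List.pyGetD_natCast]
    rw [List.getD_eq_getElem _ _ (by simpa using h2), List.getElem_map,
      List.getD_eq_getElem _ _ h2]
  rw [g1, g2]
  rw [show ((idx.getD (2 * i) 0 : Nat) : Int) + 1 = ((idx.getD (2 * i) 0 + 1 : Nat) : Int) from by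
    push_cast; ring]
  rw [PySem.List.slice_natCast]
  have key := slice_between_eq c s (2 * i) (by simpa [← hidxdef] using h2)
  rw [← hidxdef, ← hparts] at key
  exact key

-- ===== VERDICT (by name: the statement is the Claim_ definition above) =====
theorem getTagName_spec : Claim_equal_getTagName := by
  intro str optionalTags _
  unfold Spec_getTagName getTagName getTagName_alt
  cases optionalTags
  · exact congrArg (fun tags : List (List Char) =>
      (String.ofList (tags.foldl (fun st t => PySem.Chars.replace st t []) str.toList), tags.map String.ofList))
      (tags_eq '%' str.toList)
  · exact congrArg (fun tags : List (List Char) =>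
      (String.ofList (tags.foldl (fun st t => PySem.Chars.replace st t []) str.toList), tags.map String.ofList))
      (tags_eq '$' str.toList)
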